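-- pv_equiv track=rewrite | github.com/ausaki/data_structures_and_algorithms | leetcode/last-substring-in-lexicographical-order/375363847.py | lastSubstring
-- ===== SOURCE A (Python) =====
-- def lastSubstring(s: str) -> str:
--     i, j, k = 0, 1, 0
--     n = len(s)
--     while j + k < n:
--         if s[i+k] == s[j+k]:
--             k += 1
--             continue
--         elif s[i+k] > s[j+k]:
--             j = j + k + 1
--         else:
--             i = max(i + k + 1, j)
--             j = i + 1
--         k = 0
--     return s[i:]
-- ===== SOURCE B (Python) =====
-- def lastSubstring(s: str) -> str:
--     if not s:
--         return s
--     best = s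
--     for i in range(1, len(s)):
--         suf = s[i:]
--         if suf > best:
--             best = suf
--     return best
-- ===== Notes on version B (the rewrite author's own statement) =====
-- stated objective: simpler
-- what changed: B replaces A's three-pointer skip-ahead scan (maintaining candidate i, challenger j and matched length k) with a direct brute-force maximum over all suffixes, keeping the best suffix seen.
import Mathlib
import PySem

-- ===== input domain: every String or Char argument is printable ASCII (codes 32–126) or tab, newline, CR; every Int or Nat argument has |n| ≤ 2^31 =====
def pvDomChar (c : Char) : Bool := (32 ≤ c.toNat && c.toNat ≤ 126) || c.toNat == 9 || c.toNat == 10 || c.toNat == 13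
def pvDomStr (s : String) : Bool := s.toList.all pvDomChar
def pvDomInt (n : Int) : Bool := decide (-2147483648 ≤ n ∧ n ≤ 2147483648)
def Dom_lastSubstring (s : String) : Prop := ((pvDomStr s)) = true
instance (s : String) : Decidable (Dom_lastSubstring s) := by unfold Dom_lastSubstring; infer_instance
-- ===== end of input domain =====

-- B replaces A's three-pointer skip-ahead scan by a plain brute-force maximum over all
-- suffixes (simpler, not faster); both return the lexicographically largest suffix.

-- ===== PORT A =====
-- A's while-loop over state (i, j, k); character access is in range whenever the
-- Python's is, so `List.getD … ' '` is exact there.  Each Python branch is kept in order.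
-- `fuel` only makes the recursion structural; `2 * n - (min i j + j + k)` strictly
-- decreases at every Python iteration (proved in `loop_max`), so fuel `2 * n + 1`
-- is never exhausted and the `fuel = 0` arm is unreachable from `lastSubstring`.
def lastSubstringLoop (cs : List Char) (n fuel i j k : Nat) : Nat :=
  match fuel with
  | 0 => i
  | fuel + 1 =>
    if j + k < n then
      if cs.getD (i + k) ' ' = cs.getD (j + k) ' ' then
        lastSubstringLoop cs n fuel i j (k + 1)
      else if cs.getD (j + k) ' ' < cs.getD (i + k) ' ' then
        lastSubstringLoop cs n fuel i (j + k + 1) 0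
      else
        lastSubstringLoop cs n fuel (max (i + k + 1) j) (max (i + k + 1) j + 1) 0
    else i

def lastSubstring (s : String) : String :=
  String.ofList
    (s.toList.drop
      (lastSubstringLoop s.toList s.toList.length (2 * s.toList.length + 1) 0 1 0))

-- ===== PORT B =====
def lastSubstring_alt (s : String) : String :=
  if s.toList = [] then s
  else
    String.ofList <|
      (PySem.List.pyRange 1 (s.toList.length : Int) 1).foldl
        (fun best i =>
          let suf := s.toList.drop i.toNat
          if best < suf then suf else best)
        s.toList

-- ===== PRECONDITION & SPEC =====
def Spec_lastSubstring (s : String) (out : String) : Prop := out = lastSubstring_alt s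
instance (s : String) (out : String) : Decidable (Spec_lastSubstring s out) := by unfold Spec_lastSubstring; infer_instance

-- ===== CLAIM (what is proved, stated in full; the proofs are below) =====
def Claim_equal_lastSubstring : Prop := ∀ (s : String), Dom_lastSubstring s → Spec_lastSubstring s (lastSubstring s)

-- ===== LEMMAS AND PROOFS =====

-- `p` is the start of the lexicographically greatest suffix of `cs`.
def SufMax (cs : List Char) (p : Nat) : Prop :=
  p < cs.length ∧ ∀ q, q < cs.length → cs.drop q ≤ cs.drop p

-- `<` on `List Char` is `List.Lex (· < ·)`; appending equal prefixes preserves it.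
theorem lex_append_same (a : List Char) {l1 l2 : List Char} (h : l1 < l2) :
    a ++ l1 < a ++ l2 := by
  show List.Lex _ _ _
  induction a with
  | nil => exact h
  | cons x xs ih => exact List.Lex.cons ih

theorem lt_append_right (a : List Char) {r : List Char} (h : r ≠ []) : a < a ++ r := by
  show List.Lex _ _ _
  induction a with
  | nil => cases r with
    | nil => simp at h
    | cons y ys => exact List.Lex.nil
  | cons x xs ih => exact List.Lex.cons ih

-- matching segments give equal takes
theorem take_eq_of_match {cs : List Char} {a b k : Nat} (t m : Nat)
    (hak : a + t + m ≤ cs.length) (hbk : b + t + m ≤ cs.length)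
    (hm : ∀ u, u < k → cs.getD (a + u) ' ' = cs.getD (b + u) ' ')
    (htm : t + m ≤ k) :
    (cs.drop (a + t)).take m = (cs.drop (b + t)).take m := by
  apply List.ext_getElem
  · simp; omega
  · intro u h1 h2
    simp only [List.getElem_take, List.getElem_drop]
    have hu' : u < m := by simp at h1; omega
    have hu : t + u < k := by omega
    have h3 : a + (t + u) < cs.length := by omega
    have h4 : b + (t + u) < cs.length := by omega
    have := hm (t + u) hu
    rw [List.getD_eq_getElem _ _ h3, List.getD_eq_getElem _ _ h4] at this
    simpa [Nat.add_assoc] using this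

-- If the first k chars from a and b agree and cs[a+k] < cs[b+k], every shifted pair compares.
theorem suf_lt_of_match {cs : List Char} {a b k : Nat} (t : Nat)
    (hak : a + k < cs.length) (hbk : b + k < cs.length)
    (hm : ∀ u, u < k → cs.getD (a + u) ' ' = cs.getD (b + u) ' ')
    (hc : cs.getD (a + k) ' ' < cs.getD (b + k) ' ')
    (ht : t ≤ k) :
    cs.drop (a + t) < cs.drop (b + t) := by
  have hda : cs.drop (a + t) =
      (cs.drop (a + t)).take (k - t) ++ cs.drop (a + k) := by
    conv_lhs => rw [← List.take_append_drop (k - t) (cs.drop (a + t))]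
    rw [List.drop_drop]
    congr 2
    omega
  have hdb : cs.drop (b + t) =
      (cs.drop (b + t)).take (k - t) ++ cs.drop (b + k) := by
    conv_lhs => rw [← List.take_append_drop (k - t) (cs.drop (b + t))]
    rw [List.drop_drop]
    congr 2
    omega
  have hseg : (cs.drop (a + t)).take (k - t) = (cs.drop (b + t)).take (k - t) :=
    take_eq_of_match t (k - t) (by omega) (by omega) hm (by omega)
  rw [hda, hdb, hseg]
  apply lex_append_same
  rw [List.drop_eq_getElem_cons hak, List.drop_eq_getElem_cons hbk]
  rw [List.getD_eq_getElem _ _ hak, List.getD_eq_getElem _ _ hbk] at hc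
  exact List.Lex.rel hc

-- At loop exit (j + k ≥ n): every suffix starting in [j, n) is a proper prefix
-- of a longer suffix, hence smaller.
theorem suf_prefix_lt {cs : List Char} {i j k t : Nat}
    (hij : i < j) (hjk : cs.length ≤ j + k)
    (hm : ∀ u, u < k → cs.getD (i + u) ' ' = cs.getD (j + u) ' ')
    (ht : j + t < cs.length) :
    cs.drop (j + t) < cs.drop (i + t) := by
  have htake : (cs.drop (j + t)).take (cs.length - (j + t)) = cs.drop (j + t) := by
    rw [List.take_eq_self_iff]; simp
  have hseg : (cs.drop (i + t)).take (cs.length - (j + t)) = cs.drop (j + t) := by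
    rw [← htake]
    exact take_eq_of_match t (cs.length - (j + t)) (by omega) (by omega) hm (by omega)
  have hsplit : cs.drop (i + t) =
      cs.drop (j + t) ++ cs.drop (i + t + (cs.length - (j + t))) := by
    conv_lhs => rw [← List.take_append_drop (cs.length - (j + t)) (cs.drop (i + t))]
    rw [hseg, List.drop_drop]
  rw [hsplit]
  apply lt_append_right
  simp only [ne_eq, List.drop_eq_nil_iff]
  omega

theorem loop_max (cs : List Char) (n : Nat) :
    ∀ fuel i j k, n = cs.length → 2 * n - (min i j + j + k) ≤ fuel → i < j → j + k ≤ n →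
    (∀ u, u < k → cs.getD (i + u) ' ' = cs.getD (j + u) ' ') →
    (∀ p, SufMax cs p → p = i ∨ j ≤ p) →
    ∀ p, SufMax cs p → p = lastSubstringLoop cs n fuel i j k := by
  intro fuel
  induction fuel with
  | zero =>
    intro i j k hn hf hij hjk hm hM p hp
    exfalso
    omega
  | succ fuel ih =>
    intro i j k hn hf hij hjk hm hM p hp
    rw [lastSubstringLoop]
    by_cases hguard : j + k < n
    · simp only [hguard, if_true]
      by_cases heq : cs.getD (i + k) ' ' = cs.getD (j + k) ' '
      · simp only [heq, if_true]
        exact ih i j (k + 1) hn (by omega) hij (by omega)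
          (fun u hu => by
            rcases Nat.lt_or_ge u k with h | h
            · exact hm u h
            · have : u = k := by omega
              subst this; exact heq)
          hM p hp
      · simp only [heq, if_false]
        by_cases hgt : cs.getD (j + k) ' ' < cs.getD (i + k) ' '
        · simp only [hgt, if_true]
          refine ih i (j + k + 1) 0 hn (by omega) (by omega) (by omega)
            (fun u hu => by omega) ?_ p hp
          intro q hq
          rcases hM q hq with h | h
          · exact Or.inl h
          · -- q ∈ [j, j+k] is impossible: cs.drop q < cs.drop (i + (q - j))
            by_cases hq2 : j + k + 1 ≤ q
            · exact Or.inr hq2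
            · exfalso
              have hqlen : q < cs.length := hq.1
              set t := q - j with htdef
              have hqt : q = j + t := by omega
              have hlt : cs.drop (j + t) < cs.drop (i + t) :=
                suf_lt_of_match t (by omega) (by omega)
                  (fun u hu => (hm u hu).symm) hgt (by omega)
              have hle : cs.drop (i + t) ≤ cs.drop q := hq.2 (i + t) (by omega)
              rw [hqt] at hle
              exact absurd (lt_of_lt_of_le hlt hle) (lt_irrefl _)
        · simp only [hgt, if_false]
          have hlt : cs.getD (i + k) ' ' < cs.getD (j + k) ' ' :=
            lt_of_le_of_ne (le_of_not_gt hgt) heq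
          refine ih (max (i + k + 1) j) (max (i + k + 1) j + 1) 0 hn (by omega)
            (by omega) (by omega) (fun u hu => by omega) ?_ p hp
          intro q hq
          rcases hM q hq with h | h
          · -- q = i is impossible: cs.drop i < cs.drop j
            exfalso
            have hlt0 : cs.drop (i + 0) < cs.drop (j + 0) :=
              suf_lt_of_match 0 (by omega) (by omega) hm hlt (Nat.zero_le _)
            simp only [Nat.add_zero] at hlt0
            have hle : cs.drop j ≤ cs.drop q := hq.2 j (by omega)
            rw [h] at hle
            exact absurd (lt_of_lt_of_le hlt0 hle) (lt_irrefl _)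
          · by_cases hq2 : max (i + k + 1) j ≤ q
            · omega
            · exfalso
              -- j ≤ q ≤ i + k, so q = i + t with 1 ≤ t ≤ k
              have hqlen : q < cs.length := hq.1
              set t := q - i with htdef
              have hqt : q = i + t := by omega
              have hlt2 : cs.drop (i + t) < cs.drop (j + t) :=
                suf_lt_of_match t (by omega) (by omega) hm hlt (by omega)
              have hle : cs.drop (j + t) ≤ cs.drop q := hq.2 (j + t) (by omega)
              rw [hqt] at hle
              exact absurd (lt_of_lt_of_le hlt2 hle) (lt_irrefl _)
    · simp only [hguard, if_false]
      have hplen : p < cs.length := hp.1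
      rcases hM p hp with h | h
      · exact h
      · exfalso
        set t := p - j with htdef
        have hlt : cs.drop (j + t) < cs.drop (i + t) :=
          suf_prefix_lt hij (by omega) hm (by omega)
        have hle : cs.drop (i + t) ≤ cs.drop p := hp.2 (i + t) (by omega)
        have hpt : p = j + t := by omega
        rw [hpt] at hle
        exact absurd (lt_of_lt_of_le hlt hle) (lt_irrefl _)

theorem exists_isMax (cs : List Char) (hne : cs ≠ []) : ∃ p, SufMax cs p := by
  obtain ⟨p, hp1, hp2⟩ := Finset.exists_max_image (Finset.range cs.length)
    (fun q => cs.drop q) ⟨0, by simp [List.length_pos_iff.mpr hne]⟩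
  exact ⟨p, Finset.mem_range.mp hp1, fun q hq => hp2 q (Finset.mem_range.mpr hq)⟩

-- B's fold keeps the best suffix seen so far.
theorem fold_best (cs : List Char) (m : Nat) (best : List Char)
    (h1 : ∃ q, q < cs.length ∧ best = cs.drop q)
    (h2 : ∀ q, q < 1 → cs.drop q ≤ best) :
    let r := (List.range m).foldl
      (fun b k => if b < cs.drop (k + 1) then cs.drop (k + 1) else b) best
    (∃ q, q < cs.length ∧ r = cs.drop q) ∧ ∀ q, q < m + 1 → cs.drop q ≤ r := by
  induction m with
  | zero => exact ⟨h1, fun q hq => by interval_cases q; exact h2 0 (by omega)⟩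
  | succ m ih =>
    obtain ⟨ih1, ih2⟩ := ih
    set r := (List.range m).foldl
      (fun b k => if b < cs.drop (k + 1) then cs.drop (k + 1) else b) best with hr
    simp only [List.range_succ, List.foldl_append, List.foldl_cons, List.foldl_nil, ← hr]
    by_cases hc : r < cs.drop (m + 1)
    · simp only [hc, if_true]
      have hlen : m + 1 < cs.length := by
        by_contra hcon
        have : cs.drop (m + 1) = [] := List.drop_eq_nil_of_le (by omega)
        rw [this] at hc
        exact List.not_lt_nil r hc
      refine ⟨⟨m + 1, hlen, rfl⟩, fun q hq => ?_⟩
      rcases Nat.lt_or_ge q (m + 1) with h | h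
      · exact le_trans (ih2 q h) (le_of_lt hc)
      · have : q = m + 1 := by omega
        subst this; exact le_rfl
    · simp only [hc, if_false]
      refine ⟨ih1, fun q hq => ?_⟩
      rcases Nat.lt_or_ge q (m + 1) with h | h
      · exact ih2 q h
      · have : q = m + 1 := by omega
        subst this
        exact le_of_not_gt hc

theorem natCast_one_add_toNat (k : Nat) : ((1 : Int) + (k : Int)).toNat = k + 1 := by omega

-- ===== VERDICT (by name: the statement is the Claim_ definition above) =====
theorem lastSubstring_spec : Claim_equal_lastSubstring := by
  unfold Claim_equal_lastSubstring Spec_lastSubstring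
  intro s _
  by_cases hs : s.toList = []
  · have h0 : lastSubstringLoop s.toList s.toList.length
        (2 * s.toList.length + 1) 0 1 0 = 0 := by
      simp [hs, lastSubstringLoop]
    rw [lastSubstring, lastSubstring_alt, if_pos hs, h0, hs]
    cases s
    simp_all
  · set cs := s.toList with hcs
    have hn : 0 < cs.length := List.length_pos_iff.mpr hs
    obtain ⟨p, hp⟩ := exists_isMax cs hs
    -- A's side
    have hA : p = lastSubstringLoop cs cs.length (2 * cs.length + 1) 0 1 0 :=
      loop_max cs cs.length (2 * cs.length + 1) 0 1 0 rfl (by omega) (by omega)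
        (by omega) (fun u hu => by omega) (fun q _ => by omega) p hp
    -- B's side
    have hB : (PySem.List.pyRange 1 (cs.length : Int) 1).foldl
        (fun best i => if best < cs.drop i.toNat then cs.drop i.toNat else best) cs
        = cs.drop p := by
      rw [PySem.List.pyRange_one, List.foldl_map]
      simp only [natCast_one_add_toNat]
      have hm1 : ((cs.length : Int) - 1).toNat = cs.length - 1 := by omega
      rw [hm1]
      obtain ⟨⟨q, hq1, hq2⟩, hall⟩ := fold_best cs (cs.length - 1) cs
        ⟨0, hn, by simp⟩ (fun q hq => by interval_cases q; simp)
      set r := (List.range (cs.length - 1)).foldl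
        (fun b k => if b < cs.drop (k + 1) then cs.drop (k + 1) else b) cs with hr
      have hmax_r : ∀ u, u < cs.length → cs.drop u ≤ r := fun u hu => hall u (by omega)
      -- r = cs.drop q and q is a maximum, so q = p and r = cs.drop p
      have hq_max : SufMax cs q := ⟨hq1, fun u hu => hq2 ▸ hmax_r u hu⟩
      have : q = lastSubstringLoop cs cs.length (2 * cs.length + 1) 0 1 0 :=
        loop_max cs cs.length (2 * cs.length + 1) 0 1 0 rfl (by omega) (by omega)
          (by omega) (fun u hu => by omega) (fun q' _ => by omega) q hq_max
      rw [hq2, this, ← hA]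
    rw [lastSubstring, lastSubstring_alt, if_neg hs]
    simp only [← hcs]
    rw [hB, hA]
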